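-- pv_equiv track=rewrite | github.com/ThemSo/Project-1ADS | rotations.py | rotation_plateau
-- ===== SOURCE A (Python) =====
-- def rotation_plateau(plateau, m, n, sens):
--     x, y, maxx, maxy = 0, 0, m // 2, m // 2
--
--     if n % 2 == 0:
--         x = m // 2
--         maxx = m
--     if n > 2:
--         y = m // 2
--         maxy = m
--     tmp = [[0 for i in range(m // 2)] for i in range(m // 2)]
--     tmpy = maxy
--     while tmpy > y:
--         tmpx = maxx
--         while tmpx > x:
--             if not sens:
--                 tmp[maxy - tmpy][tmpx - x - 1] = plateau[tmpx - 1][tmpy - 1]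
--             else:
--                 tmp[tmpy - y - 1][maxx - tmpx] = plateau[tmpx - 1][tmpy - 1]
--             tmpx -= 1
--         tmpy -= 1
--
--     for nx, vx in enumerate(tmp):
--         for ny, vy in enumerate(vx):
--             plateau[nx + x][ny + y] = vy
--
--     return plateau
-- ===== SOURCE B (Python) =====
-- def rotation_plateau(plateau, m, n, sens):
--     # Builds the rotated board functionally by a direct index mapping (no temp
--     # q x q buffer, no in-place writes); A mutates `plateau` in place, B returns
--     # a fresh list with the same value.
--     q = m // 2
--     x = q if n % 2 == 0 else 0
--     y = q if n > 2 else 0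
--
--     def cell(i, j):
--         if q > 0 and x <= i < x + q and y <= j < y + q:
--             a, b = i - x, j - y
--             return plateau[x + q - 1 - b][y + a] if sens else plateau[x + b][y + q - 1 - a]
--         return plateau[i][j]
--
--     return [[cell(i, j) for j, _ in enumerate(row)] for i, row in enumerate(plateau)]
-- ===== Notes on version B (the rewrite author's own statement) =====
-- stated objective: simpler
-- what changed: Replaces A's temp buffer filled by two countdown while-loops plus an enumerate write-back with a single functional comprehension computing each cell of the result directly from a closed-form index mapping of the rotated quadrant; A mutates the board in place, B returns a fresh equal board.
import Mathlib
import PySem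

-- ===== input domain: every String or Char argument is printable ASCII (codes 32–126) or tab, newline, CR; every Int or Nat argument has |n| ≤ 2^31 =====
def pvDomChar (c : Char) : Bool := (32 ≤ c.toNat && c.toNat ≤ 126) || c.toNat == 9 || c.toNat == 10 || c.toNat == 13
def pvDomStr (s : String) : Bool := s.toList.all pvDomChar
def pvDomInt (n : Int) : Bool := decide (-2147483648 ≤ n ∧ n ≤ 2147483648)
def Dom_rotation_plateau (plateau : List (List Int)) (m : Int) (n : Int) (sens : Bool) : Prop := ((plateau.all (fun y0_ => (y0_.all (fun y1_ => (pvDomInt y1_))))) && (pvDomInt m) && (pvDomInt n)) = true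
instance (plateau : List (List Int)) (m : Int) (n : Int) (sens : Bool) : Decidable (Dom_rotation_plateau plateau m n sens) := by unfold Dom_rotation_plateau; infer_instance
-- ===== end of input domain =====

-- B rebuilds the board functionally from a closed-form index mapping instead of A's
-- temp-buffer-plus-write-back; A mutates `plateau` in place, B returns a fresh list
-- with the same value (the equivalence proved here is about the return value).

-- ===== PORT A =====

-- plateau[i][j] (read); exact for the nonneg in-range indices both programs use inside Pre_
def pvGet2 (g : List (List Int)) (i j : Int) : Int :=
  PySem.List.pyGetD (PySem.List.pyGetD g i []) j 0

-- plateau[i][j] = v (write); exact for the nonneg in-range indices used inside Pre_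
def pvSet2 (g : List (List Int)) (i j : Int) (v : Int) : List (List Int) :=
  PySem.List.pySetD g i (PySem.List.pySetD (PySem.List.pyGetD g i []) j v)

-- inner 'while tmpx > x' loop of A; fuel = number of iterations = (tmpx0 - x).toNat
def aInner (plateau : List (List Int)) (sens : Bool) (x y maxx maxy tmpy : Int) :
    Nat → Int → List (List Int) → List (List Int)
  | 0, _, tmp => tmp
  | k+1, tmpx, tmp =>
      let tmp' :=
        if !sens then
          pvSet2 tmp (maxy - tmpy) (tmpx - x - 1) (pvGet2 plateau (tmpx - 1) (tmpy - 1))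
        else
          pvSet2 tmp (tmpy - y - 1) (maxx - tmpx) (pvGet2 plateau (tmpx - 1) (tmpy - 1))
      aInner plateau sens x y maxx maxy tmpy k (tmpx - 1) tmp'

-- outer 'while tmpy > y' loop of A; fuel = (tmpy0 - y).toNat
def aOuter (plateau : List (List Int)) (sens : Bool) (x y maxx maxy : Int) :
    Nat → Int → List (List Int) → List (List Int)
  | 0, _, tmp => tmp
  | k+1, tmpy, tmp =>
      aOuter plateau sens x y maxx maxy k (tmpy - 1)
        (aInner plateau sens x y maxx maxy tmpy (maxx - x).toNat maxx tmp)

-- 'for ny, vy in enumerate(vx): plateau[nx+x][ny+y] = vy'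
def wbRow (x y : Int) (nx : Int) : Int → List Int → List (List Int) → List (List Int)
  | _, [], acc => acc
  | ny, vy :: rest, acc => wbRow x y nx (ny + 1) rest (pvSet2 acc (nx + x) (ny + y) vy)

-- 'for nx, vx in enumerate(tmp): …'
def wb (x y : Int) : Int → List (List Int) → List (List Int) → List (List Int)
  | _, [], acc => acc
  | nx, vx :: rest, acc => wb x y (nx + 1) rest (wbRow x y nx 0 vx acc)

def rotation_plateau (plateau : List (List Int)) (m : Int) (n : Int) (sens : Bool) : List (List Int) :=
  let q := PySem.Int.floordiv m 2
  let x := if PySem.Int.mod n 2 = 0 then q else 0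
  let maxx := if PySem.Int.mod n 2 = 0 then m else q
  let y := if n > 2 then q else 0
  let maxy := if n > 2 then m else q
  let tmp := List.replicate q.toNat (List.replicate q.toNat (0 : Int))
  let tmp2 := aOuter plateau sens x y maxx maxy (maxy - y).toNat maxy tmp
  wb x y 0 tmp2 plateau

-- ===== PORT B =====

def bCell (plateau : List (List Int)) (q x y : Int) (sens : Bool) (i j : Nat) : Int :=
  if 0 < q ∧ x ≤ (i : Int) ∧ (i : Int) < x + q ∧ y ≤ (j : Int) ∧ (j : Int) < y + q then
    let a := (i : Int) - x
    let b := (j : Int) - y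
    if sens then pvGet2 plateau (x + q - 1 - b) (y + a) else pvGet2 plateau (x + b) (y + q - 1 - a)
  else pvGet2 plateau (i : Int) (j : Int)

def rotation_plateau_alt (plateau : List (List Int)) (m : Int) (n : Int) (sens : Bool) : List (List Int) :=
  let q := PySem.Int.floordiv m 2
  let x := if PySem.Int.mod n 2 = 0 then q else 0
  let y := if n > 2 then q else 0
  plateau.mapIdx (fun i row => row.mapIdx (fun j _ => bCell plateau q x y sens i j))

-- ===== PRECONDITION & SPEC =====
-- Pre_ excludes exactly the inputs on which A raises IndexError: a quadrant whose side
-- exceeds the m//2-sized temp buffer (odd m with the right/bottom quadrants selected),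
-- or a board too small for the selected quadrant.
def Pre_rotation_plateau (plateau : List (List Int)) (m : Int) (n : Int) (sens : Bool) : Prop :=
  let q := PySem.Int.floordiv m 2
  let x := if PySem.Int.mod n 2 = 0 then q else 0
  let maxx := if PySem.Int.mod n 2 = 0 then m else q
  let y := if n > 2 then q else 0
  let maxy := if n > 2 then m else q
  (maxy ≤ y ∨ maxx ≤ x) ∨
  (maxy - y = q ∧ maxx - x = q ∧ (x + q).toNat ≤ plateau.length ∧
    ∀ row ∈ (plateau.drop x.toNat).take q.toNat, (y + q).toNat ≤ row.length)
instance (plateau : List (List Int)) (m : Int) (n : Int) (sens : Bool) : Decidable (Pre_rotation_plateau plateau m n sens) := by unfold Pre_rotation_plateau; infer_instance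

def pvWitness_rotation_plateau : List (List Int) × Int × Int × Bool := ([[1, 2], [3, 4]], 2, 1, false)

def Spec_rotation_plateau (plateau : List (List Int)) (m : Int) (n : Int) (sens : Bool) (out : List (List Int)) : Prop := out = rotation_plateau_alt plateau m n sens
instance (plateau : List (List Int)) (m : Int) (n : Int) (sens : Bool) (out : List (List Int)) : Decidable (Spec_rotation_plateau plateau m n sens out) := by unfold Spec_rotation_plateau; infer_instance

-- ===== CLAIM (what is proved, stated in full; the proofs are below) =====
def Claim_equal_rotation_plateau : Prop := ∀ (plateau : List (List Int)) (m : Int) (n : Int) (sens : Bool), Dom_rotation_plateau plateau m n sens → Pre_rotation_plateau plateau m n sens → Spec_rotation_plateau plateau m n sens (rotation_plateau plateau m n sens)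

-- ===== LEMMAS AND PROOFS =====

def GShape (g : List (List Int)) (Q : Nat) : Prop := g.length = Q ∧ ∀ r ∈ g, r.length = Q

def gg (g : List (List Int)) (a b : Nat) : Int := (g.getD a []).getD b 0

theorem pvSet2_nil (i j : Int) (v : Int) : pvSet2 [] i j v = [] := by
  have h := PySem.List.length_pySetD ([] : List (List Int)) i (PySem.List.pySetD (PySem.List.pyGetD ([] : List (List Int)) i []) j v)
  rw [pvSet2]
  exact List.eq_nil_of_length_eq_zero (by simp [h])

theorem length_pvSet2 (g : List (List Int)) (i j : Int) (v : Int) :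
    (pvSet2 g i j v).length = g.length := PySem.List.length_pySetD g i _

theorem gg_pvGet2 (g : List (List Int)) (a b : Nat) : pvGet2 g (a : Int) (b : Int) = gg g a b := by
  simp [pvGet2, gg, PySem.List.pyGetD_of_nonneg _ _ (Int.natCast_nonneg _)]

theorem pvSet2_natCast (g : List (List Int)) (i j : Nat) (v : Int) :
    pvSet2 g (i : Int) (j : Int) v = g.set i ((g.getD i []).set j v) := by
  rw [pvSet2, PySem.List.pySetD_of_nonneg _ _ (Int.natCast_nonneg _),
      PySem.List.pySetD_of_nonneg _ _ (Int.natCast_nonneg _),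
      PySem.List.pyGetD_of_nonneg _ _ (Int.natCast_nonneg _)]
  simp

theorem shape_pvSet2 {g : List (List Int)} {Q : Nat} (hs : GShape g Q) (i j : Nat) (v : Int) :
    GShape (pvSet2 g (i : Int) (j : Int) v) Q := by
  obtain ⟨h1, h2⟩ := hs
  rw [pvSet2_natCast]
  by_cases hlt : i < g.length
  · refine ⟨by simpa using h1, ?_⟩
    intro r hr
    rcases List.mem_or_eq_of_mem_set hr with h | h
    · exact h2 r h
    · subst h
      rw [List.length_set, List.getD_eq_getElem _ _ hlt]
      exact h2 _ (List.getElem_mem _)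
  · rw [List.set_eq_of_length_le (Nat.le_of_not_lt hlt)]
    exact ⟨h1, h2⟩

theorem gg_pvSet2 {g : List (List Int)} {Q : Nat} (hs : GShape g Q) {i j : Nat} (hi : i < Q) (hj : j < Q)
    (v : Int) (a b : Nat) :
    gg (pvSet2 g (i : Int) (j : Int) v) a b = if a = i ∧ b = j then v else gg g a b := by
  obtain ⟨h1, h2⟩ := hs
  have hig : i < g.length := h1 ▸ hi
  have hrow : (g.getD i []).length = Q := by
    rw [List.getD_eq_getElem _ _ hig]; exact h2 _ (List.getElem_mem _)
  have hjr : j < (g.getD i []).length := hrow ▸ hj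
  simp only [gg, pvSet2_natCast, List.getD_eq_getElem?_getD] at *
  rw [List.getElem?_set]
  by_cases ha : i = a
  · subst ha
    rw [if_pos rfl, if_pos hig, Option.getD_some]
    rw [List.getElem?_set]
    by_cases hb : j = b
    · subst hb
      simp [hjr]
    · simp only [if_neg hb]
      simp only [true_and]
      exact (if_neg (fun h : b = j => hb h.symm)).symm
  · simp only [if_neg ha]
    exact (if_neg (fun h : a = i ∧ b = j => ha h.1.symm)).symm

def srcA (plateau : List (List Int)) (sens : Bool) (x y : Int) (Q : Nat) (a b : Nat) : Int :=
  if sens then pvGet2 plateau (x + Q - 1 - b) (y + a)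
  else pvGet2 plateau (x + b) (y + Q - 1 - a)

theorem aInner_char (plateau : List (List Int)) (sens : Bool) (x y : Int) (Q t : Nat)
    (ht1 : 1 ≤ t) (ht : t ≤ Q) :
    ∀ (k : Nat), k ≤ Q → ∀ (tmp : List (List Int)), GShape tmp Q →
    GShape (aInner plateau sens x y (x + Q) (y + Q) (y + t) k (x + k) tmp) Q ∧
    ∀ a b : Nat,
      gg (aInner plateau sens x y (x + Q) (y + Q) (y + t) k (x + k) tmp) a b =
        if a = (if sens then t - 1 else Q - t) ∧ (if sens then Q - k ≤ b ∧ b < Q else b < k) then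
          srcA plateau sens x y Q a b
        else gg tmp a b := by
  intro k
  induction k with
  | zero =>
    intro _ tmp hs
    refine ⟨hs, ?_⟩
    intro a b
    have : ¬ (a = (if sens then t - 1 else Q - t) ∧ (if sens then Q - 0 ≤ b ∧ b < Q else b < 0)) := by
      rcases sens <;> simp
    rw [aInner, if_neg this]
  | succ k ih =>
    intro hk tmp hs
    have hk' : k ≤ Q := Nat.le_of_succ_le hk
    rcases sens with _ | _
    · -- sens = false
      have hstep : aInner plateau false x y (x + Q) (y + Q) (y + t) (k+1) (x + ((k+1 : Nat) : Int)) tmp =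
          aInner plateau false x y (x + Q) (y + Q) (y + t) k (x + (k : Int))
            (pvSet2 tmp (((Q - t : Nat) : Int)) ((k : Nat) : Int)
              (pvGet2 plateau (x + (k : Int)) (y + ((t - 1 : Nat) : Int)))) := by
        rw [aInner]
        simp only [Bool.not_false, if_true]
        rw [show x + ((k+1 : Nat) : Int) - 1 = x + (k : Int) from by omega,
            show (y + (Q : Int)) - (y + (t : Int)) = ((Q - t : Nat) : Int) from by omega,
            show x + ((k+1 : Nat) : Int) - x - 1 = ((k : Nat) : Int) from by omega,
            show y + (t : Int) - 1 = y + ((t - 1 : Nat) : Int) from by omega]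
      rw [hstep]
      have hsh' := shape_pvSet2 hs (Q - t) k (pvGet2 plateau (x + (k : Int)) (y + ((t - 1 : Nat) : Int)))
      obtain ⟨ihs, ihg⟩ := ih hk' _ hsh'
      refine ⟨ihs, ?_⟩
      intro a b
      rw [ihg a b, gg_pvSet2 hs (by omega) (by omega)]
      simp only [Bool.false_eq_true, reduceIte]
      have hv : pvGet2 plateau (x + (k : Int)) (y + ((t - 1 : Nat) : Int)) =
          srcA plateau false x y Q (Q - t) k := by
        rw [srcA]
        simp only [Bool.false_eq_true, reduceIte]
        rw [show y + (Q : Int) - 1 - ((Q - t : Nat) : Int) = y + ((t - 1 : Nat) : Int) from by omega]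
      by_cases hab : a = Q - t ∧ b < k + 1
      · rw [if_pos hab]
        by_cases hb : b < k
        · rw [if_pos ⟨hab.1, hb⟩]
        · have hbk : b = k := by omega
          rw [if_neg (fun h => hb h.2), if_pos ⟨hab.1, hbk⟩, hv, hab.1, hbk]
      · rw [if_neg hab, if_neg (fun h => hab ⟨h.1, by omega⟩), if_neg (fun h => hab ⟨h.1, by omega⟩)]
    · -- sens = true
      have hstep : aInner plateau true x y (x + Q) (y + Q) (y + t) (k+1) (x + ((k+1 : Nat) : Int)) tmp =
          aInner plateau true x y (x + Q) (y + Q) (y + t) k (x + (k : Int))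
            (pvSet2 tmp (((t - 1 : Nat) : Int)) (((Q - (k+1) : Nat) : Int))
              (pvGet2 plateau (x + (k : Int)) (y + ((t - 1 : Nat) : Int)))) := by
        rw [aInner]
        simp only [Bool.not_true, Bool.false_eq_true, if_false]
        rw [show x + ((k+1 : Nat) : Int) - 1 = x + (k : Int) from by omega,
            show y + (t : Int) - y - 1 = ((t - 1 : Nat) : Int) from by omega,
            show (x + (Q : Int)) - (x + ((k+1 : Nat) : Int)) = ((Q - (k+1) : Nat) : Int) from by omega,
            show y + (t : Int) - 1 = y + ((t - 1 : Nat) : Int) from by omega]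
      rw [hstep]
      have hsh' := shape_pvSet2 hs (t - 1) (Q - (k+1)) (pvGet2 plateau (x + (k : Int)) (y + ((t - 1 : Nat) : Int)))
      obtain ⟨ihs, ihg⟩ := ih hk' _ hsh'
      refine ⟨ihs, ?_⟩
      intro a b
      rw [ihg a b, gg_pvSet2 hs (by omega) (by omega)]
      simp only [reduceIte]
      have hv : pvGet2 plateau (x + (k : Int)) (y + ((t - 1 : Nat) : Int)) =
          srcA plateau true x y Q (t - 1) (Q - (k+1)) := by
        rw [srcA]
        simp only [reduceIte]
        rw [show x + (Q : Int) - 1 - ((Q - (k+1) : Nat) : Int) = x + (k : Int) from by omega]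
      by_cases hab : a = t - 1 ∧ (Q - (k+1) ≤ b ∧ b < Q)
      · rw [if_pos hab]
        by_cases hb : Q - k ≤ b
        · rw [if_pos ⟨hab.1, hb, hab.2.2⟩]
        · have hbk : b = Q - (k+1) := by omega
          rw [if_neg (fun h => hb h.2.1), if_pos ⟨hab.1, hbk⟩, hv, hab.1, hbk]
      · rw [if_neg hab, if_neg (fun h => hab ⟨h.1, by omega, h.2.2⟩), if_neg (fun h => hab ⟨h.1, by omega⟩)]

theorem aOuter_char (plateau : List (List Int)) (sens : Bool) (x y : Int) (Q : Nat) :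
    ∀ (t : Nat), t ≤ Q → ∀ (tmp : List (List Int)), GShape tmp Q →
    GShape (aOuter plateau sens x y (x + Q) (y + Q) t (y + t) tmp) Q ∧
    ∀ a b : Nat, b < Q →
      gg (aOuter plateau sens x y (x + Q) (y + Q) t (y + t) tmp) a b =
        if (if sens then a < t else Q - t ≤ a ∧ a < Q) then srcA plateau sens x y Q a b
        else gg tmp a b := by
  intro t
  induction t with
  | zero =>
    intro _ tmp hs
    refine ⟨hs, ?_⟩
    intro a b _
    have : ¬ (if sens then a < 0 else Q - 0 ≤ a ∧ a < Q) := by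
      rcases sens <;> simp
    rw [aOuter, if_neg this]
  | succ t ih =>
    intro ht tmp hs
    have hstep : aOuter plateau sens x y (x + Q) (y + Q) (t+1) (y + ((t+1 : Nat) : Int)) tmp =
        aOuter plateau sens x y (x + Q) (y + Q) t (y + (t : Int))
          (aInner plateau sens x y (x + Q) (y + Q) (y + ((t+1 : Nat) : Int)) Q (x + (Q : Int)) tmp) := by
      rw [aOuter]
      congr 1
      · omega
      · rw [show (x + (Q : Int)) - x = ((Q : Nat) : Int) from by omega, Int.toNat_natCast]
    rw [hstep]
    obtain ⟨is1, ig1⟩ := aInner_char plateau sens x y Q (t+1) (by omega) ht Q le_rfl tmp hs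
    obtain ⟨is2, ig2⟩ := ih (by omega) _ is1
    refine ⟨is2, ?_⟩
    intro a b hb
    rw [ig2 a b hb, ig1 a b]
    rcases sens with _ | _
    · simp only [Bool.false_eq_true, reduceIte]
      by_cases hc : Q - (t+1) ≤ a ∧ a < Q
      · rw [if_pos hc]
        by_cases h1 : Q - t ≤ a ∧ a < Q
        · rw [if_pos h1]
        · rw [if_neg h1, if_pos ⟨by omega, by omega⟩]
      · rw [if_neg hc, if_neg (fun h => hc ⟨by omega, h.2⟩), if_neg (fun h => hc ⟨by omega, by omega⟩)]
    · simp only [reduceIte]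
      by_cases hc : a < t + 1
      · rw [if_pos hc]
        by_cases h1 : a < t
        · rw [if_pos h1]
        · rw [if_neg h1, if_pos ⟨by omega, by omega⟩]
      · rw [if_neg hc, if_neg (fun h => hc (by omega)), if_neg (fun h => hc (by omega : a < t + 1))]

theorem rowlen_eq (g : List (List Int)) (a : Nat) :
    (g.getD a []).length = (g.map List.length).getD a 0 := by
  simp only [List.getD_eq_getElem?_getD, List.getElem?_map]
  cases g[a]? <;> simp

theorem mapLen_pvSet2 (g : List (List Int)) (i j : Nat) (v : Int) :
    (pvSet2 g (i : Int) (j : Int) v).map List.length = g.map List.length := by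
  rw [pvSet2_natCast]
  by_cases hi : i < g.length
  · rw [List.map_set]
    have : ((g.getD i []).set j v).length = g[i].length := by
      rw [List.length_set, List.getD_eq_getElem _ _ hi]
    rw [this, ← List.getElem_map (f := List.length) (h := by simpa using hi),
        List.set_getElem_self]
  · rw [List.set_eq_of_length_le (by simpa using Nat.le_of_not_lt hi)]

theorem gg_pvSet2' (g : List (List Int)) {i j : Nat} (hi : i < g.length)
    (hj : j < (g.getD i []).length) (v : Int) (a b : Nat) :
    gg (pvSet2 g (i : Int) (j : Int) v) a b = if a = i ∧ b = j then v else gg g a b := by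
  simp only [gg, pvSet2_natCast, List.getD_eq_getElem?_getD] at *
  rw [List.getElem?_set]
  by_cases ha : i = a
  · subst ha
    rw [if_pos rfl, if_pos hi, Option.getD_some]
    rw [List.getElem?_set]
    by_cases hb : j = b
    · subst hb
      simp [hj]
    · simp only [if_neg hb]
      simp only [true_and]
      exact (if_neg (fun h : b = j => hb h.symm)).symm
  · simp only [if_neg ha]
    exact (if_neg (fun h : a = i ∧ b = j => ha h.1.symm)).symm

theorem pvGet2_getElem (g : List (List Int)) {i j : Nat} (hi : i < g.length)
    (hj : j < g[i].length) : pvGet2 g (i : Int) (j : Int) = g[i][j] := by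
  rw [gg_pvGet2, gg, List.getD_eq_getElem _ _ hi, List.getD_eq_getElem _ _ hj]

theorem wbRow_char (x y : Int) (hx : 0 ≤ x) (hy : 0 ≤ y) (nx : Nat) :
    ∀ (row : List Int) (ny0 : Nat) (acc : List (List Int)),
    x.toNat + nx < acc.length →
    y.toNat + ny0 + row.length ≤ (acc.getD (x.toNat + nx) []).length →
    ((wbRow x y (nx : Int) (ny0 : Int) row acc).map List.length = acc.map List.length ∧
     ∀ a b : Nat,
       gg (wbRow x y (nx : Int) (ny0 : Int) row acc) a b =
         if a = x.toNat + nx ∧ y.toNat + ny0 ≤ b ∧ b < y.toNat + ny0 + row.length then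
           row.getD (b - (y.toNat + ny0)) 0
         else gg acc a b) := by
  intro row
  induction row with
  | nil =>
    intro ny0 acc _ _
    refine ⟨rfl, ?_⟩
    intro a b
    have hc : ¬ (a = x.toNat + nx ∧ y.toNat + ny0 ≤ b ∧ b < y.toNat + ny0 + ([] : List Int).length) := by
      simp only [List.length_nil]; omega
    rw [wbRow, if_neg hc]
  | cons vy rest ih =>
    intro ny0 acc hlen hrow
    have hstep : wbRow x y (nx : Int) (ny0 : Int) (vy :: rest) acc =
        wbRow x y (nx : Int) ((ny0 + 1 : Nat) : Int) rest
          (pvSet2 acc (((x.toNat + nx : Nat) : Int)) (((y.toNat + ny0 : Nat) : Int)) vy) := by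
      rw [wbRow, show (nx : Int) + x = ((x.toNat + nx : Nat) : Int) from by omega,
          show (ny0 : Int) + y = ((y.toNat + ny0 : Nat) : Int) from by omega,
          show (ny0 : Int) + 1 = ((ny0 + 1 : Nat) : Int) from by omega]
    rw [hstep]
    have hjr : y.toNat + ny0 < (acc.getD (x.toNat + nx) []).length := by
      simp only [List.length_cons] at hrow; omega
    have hml := mapLen_pvSet2 acc (x.toNat + nx) (y.toNat + ny0) vy
    have hrow' : y.toNat + ny0 + (rest.length + 1) ≤ (acc.getD (x.toNat + nx) []).length := by
      simp only [List.length_cons] at hrow; omega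
    obtain ⟨ihm, ihg⟩ := ih (ny0 + 1)
      (pvSet2 acc (((x.toNat + nx : Nat) : Int)) (((y.toNat + ny0 : Nat) : Int)) vy)
      (by rw [length_pvSet2]; exact hlen)
      (by rw [rowlen_eq, hml, ← rowlen_eq]; omega)
    refine ⟨by rw [ihm, hml], ?_⟩
    intro a b
    rw [ihg a b, gg_pvSet2' acc hlen hjr]
    by_cases hwin : a = x.toNat + nx ∧ y.toNat + ny0 ≤ b ∧ b < y.toNat + ny0 + (vy :: rest).length
    · rw [if_pos hwin]
      by_cases hb1 : y.toNat + (ny0 + 1) ≤ b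
      · rw [if_pos ⟨hwin.1, hb1, by simp only [List.length_cons] at hwin ⊢; omega⟩,
            show b - (y.toNat + ny0) = (b - (y.toNat + (ny0 + 1))) + 1 from by omega]
        rw [List.getD_cons_succ]
      · have hb0 : b = y.toNat + ny0 := by omega
        rw [if_neg (fun h => hb1 h.2.1), if_pos ⟨hwin.1, hb0⟩, hb0]
        simp
    · rw [if_neg hwin,
          if_neg (fun h => hwin ⟨h.1, by omega, by simp only [List.length_cons]; omega⟩),
          if_neg (fun h => hwin ⟨h.1, by omega, by simp only [List.length_cons]; omega⟩)]

theorem wb_char (x y : Int) (hx : 0 ≤ x) (hy : 0 ≤ y) (Q : Nat) :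
    ∀ (tmp : List (List Int)) (nx0 : Nat) (acc : List (List Int)),
    (∀ r ∈ tmp, r.length = Q) →
    x.toNat + nx0 + tmp.length ≤ acc.length →
    (∀ a : Nat, x.toNat + nx0 ≤ a → a < x.toNat + nx0 + tmp.length → y.toNat + Q ≤ (acc.getD a []).length) →
    ((wb x y (nx0 : Int) tmp acc).map List.length = acc.map List.length ∧
     ∀ a b : Nat,
       gg (wb x y (nx0 : Int) tmp acc) a b =
         if x.toNat + nx0 ≤ a ∧ a < x.toNat + nx0 + tmp.length ∧ y.toNat ≤ b ∧ b < y.toNat + Q then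
           gg tmp (a - (x.toNat + nx0)) (b - y.toNat)
         else gg acc a b) := by
  intro tmp
  induction tmp with
  | nil =>
    intro nx0 acc _ _ _
    refine ⟨rfl, ?_⟩
    intro a b
    have hc : ¬ (x.toNat + nx0 ≤ a ∧ a < x.toNat + nx0 + ([] : List (List Int)).length ∧ y.toNat ≤ b ∧ b < y.toNat + Q) := by
      simp only [List.length_nil]; omega
    rw [wb, if_neg hc]
  | cons vx rest ih =>
    intro nx0 acc hrows hlen hrl
    have hstep : wb x y (nx0 : Int) (vx :: rest) acc =
        wb x y ((nx0 + 1 : Nat) : Int) rest (wbRow x y (nx0 : Int) ((0 : Nat) : Int) vx acc) := by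
      rw [wb, show (nx0 : Int) + 1 = ((nx0 + 1 : Nat) : Int) from by omega]
      norm_num
    rw [hstep]
    have hvx : vx.length = Q := hrows vx List.mem_cons_self
    have hlc : (vx :: rest).length = rest.length + 1 := List.length_cons ..
    obtain ⟨wm, wg⟩ := wbRow_char x y hx hy nx0 vx 0 acc (by omega) (by
      have := hrl (x.toNat + nx0) (by omega) (by omega); omega)
    obtain ⟨ihm, ihg⟩ := ih (nx0 + 1) (wbRow x y (nx0 : Int) ((0 : Nat) : Int) vx acc)
      (fun r hr => hrows r (List.mem_cons_of_mem _ hr))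
      (by rw [show (wbRow x y (nx0 : Int) ((0 : Nat) : Int) vx acc).length = ((wbRow x y (nx0 : Int) ((0 : Nat) : Int) vx acc).map List.length).length from (List.length_map ..).symm, wm, List.length_map]; omega)
      (by intro a h1 h2
          rw [rowlen_eq, wm, ← rowlen_eq]
          exact hrl a (by omega) (by omega))
    refine ⟨by rw [ihm, wm], ?_⟩
    intro a b
    rw [ihg a b]
    by_cases hwin : x.toNat + nx0 ≤ a ∧ a < x.toNat + nx0 + (vx :: rest).length ∧ y.toNat ≤ b ∧ b < y.toNat + Q
    · rw [if_pos hwin]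
      by_cases h1 : x.toNat + (nx0 + 1) ≤ a
      · rw [if_pos ⟨h1, by omega, hwin.2.2⟩,
            show a - (x.toNat + nx0) = (a - (x.toNat + (nx0 + 1))) + 1 from by omega]
        rfl
      · have ha : a = x.toNat + nx0 := by omega
        rw [if_neg (fun h => h1 h.1), wg a b,
            if_pos ⟨ha, by omega, by omega⟩, ha]
        simp only [Nat.sub_self]
        rw [show y.toNat + 0 = y.toNat from by omega]
        rfl
    · rw [if_neg hwin, if_neg (fun h => hwin ⟨by omega, by omega, h.2.2⟩), wg a b,
          if_neg (fun h => hwin ⟨by omega, by omega, by omega, by omega⟩)]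

theorem aInner_nil (plateau : List (List Int)) (sens : Bool) (x y maxx maxy tmpy : Int) :
    ∀ (k : Nat) (tmpx : Int), aInner plateau sens x y maxx maxy tmpy k tmpx [] = [] := by
  intro k
  induction k with
  | zero => intro _; rfl
  | succ k ih =>
    intro tmpx
    rw [aInner]
    rcases sens <;> simp only [Bool.not_false, Bool.not_true, Bool.false_eq_true, if_true, if_false, pvSet2_nil] <;> exact ih _

theorem aOuter_nil (plateau : List (List Int)) (sens : Bool) (x y maxx maxy : Int) :
    ∀ (k : Nat) (tmpy : Int), aOuter plateau sens x y maxx maxy k tmpy [] = [] := by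
  intro k
  induction k with
  | zero => intro _; rfl
  | succ k ih =>
    intro tmpy
    rw [aOuter, aInner_nil]
    exact ih _

theorem bgrid_id (plateau : List (List Int)) (q x y : Int) (sens : Bool) (hq : ¬ 0 < q) :
    plateau.mapIdx (fun i row => row.mapIdx (fun j _ => bCell plateau q x y sens i j)) = plateau := by
  apply List.ext_getElem (by simp)
  intro i hi _
  rw [List.getElem_mapIdx]
  apply List.ext_getElem (by simp)
  intro j hj _
  rw [List.getElem_mapIdx]
  rw [bCell, if_neg (fun h => hq h.1)]
  exact pvGet2_getElem plateau (by simpa using hi) (by simpa using hj)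

theorem main_branch (plateau : List (List Int)) (sens : Bool) (x y q maxx maxy : Int) (Q : Nat)
    (hq : q = (Q : Int)) (hQ0 : 0 < Q) (hx : 0 ≤ x) (hy : 0 ≤ y)
    (hmx : maxx = x + q) (hmy : maxy = y + q)
    (hlen : x.toNat + Q ≤ plateau.length)
    (hrl : ∀ a : Nat, x.toNat ≤ a → a < x.toNat + Q → y.toNat + Q ≤ (plateau.getD a []).length) :
    wb x y 0 (aOuter plateau sens x y maxx maxy (maxy - y).toNat maxy
        (List.replicate q.toNat (List.replicate q.toNat (0 : Int)))) plateau
      = plateau.mapIdx (fun i row => row.mapIdx (fun j _ => bCell plateau q x y sens i j)) := by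
  subst hmx hmy hq
  rw [show (y + (Q : Int) - y).toNat = Q from by omega, Int.toNat_natCast,
      show y + (Q : Int) = y + ((Q : Nat) : Int) from rfl]
  have hshape0 : GShape (List.replicate Q (List.replicate Q (0 : Int))) Q :=
    ⟨by simp, fun r hr => by rw [List.eq_of_mem_replicate hr]; simp⟩
  obtain ⟨gs, gc⟩ := aOuter_char plateau sens x y Q Q le_rfl _ hshape0
  set G := aOuter plateau sens x y (x + (Q : Int)) (y + (Q : Int)) Q (y + (Q : Int))
      (List.replicate Q (List.replicate Q (0 : Int))) with hG
  obtain ⟨wm, wgg⟩ := wb_char x y hx hy Q G 0 plateau gs.2 (by rw [gs.1]; omega)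
    (by intro a h1 h2; rw [gs.1] at h2; exact hrl a (by omega) (by omega))
  simp only [Nat.cast_zero, Nat.add_zero, gs.1] at wm wgg
  rw [show (0 : Int) = ((0 : Nat) : Int) from rfl] at *
  simp only [Nat.cast_zero] at *
  have hL : (wb x y 0 G plateau).length = plateau.length := by
    have := congrArg List.length wm
    simpa using this
  apply List.ext_getElem (by rw [hL, List.length_mapIdx])
  intro i hi1 hi2
  have hip : i < plateau.length := by rwa [hL] at hi1
  have hrowlen : (wb x y 0 G plateau)[i].length = plateau[i].length := by
    have h1 := rowlen_eq (wb x y 0 G plateau) i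
    have h2 := rowlen_eq plateau i
    rw [wm] at h1
    rw [List.getD_eq_getElem _ _ hi1] at h1
    rw [List.getD_eq_getElem _ _ hip] at h2
    rw [h1, h2]
  rw [List.getElem_mapIdx]
  apply List.ext_getElem (by rw [hrowlen, List.length_mapIdx])
  intro j hj1 hj2
  have hjp : j < plateau[i].length := by rwa [hrowlen] at hj1
  rw [List.getElem_mapIdx]
  have hcell : (wb x y 0 G plateau)[i][j] = gg (wb x y 0 G plateau) i j := by
    rw [gg, List.getD_eq_getElem _ _ hi1, List.getD_eq_getElem _ _ hj1]
  rw [hcell, wgg i j]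
  by_cases hwin : x.toNat ≤ i ∧ i < x.toNat + Q ∧ y.toNat ≤ j ∧ j < y.toNat + Q
  · rw [if_pos hwin]
    have hbq : j - y.toNat < Q := by omega
    rw [gc (i - x.toNat) (j - y.toNat) hbq]
    have hcond : (if sens then i - x.toNat < Q else Q - Q ≤ i - x.toNat ∧ i - x.toNat < Q) := by
      rcases sens <;> simp <;> omega
    rw [if_pos hcond, bCell,
        if_pos (show 0 < ((Q : Nat) : Int) ∧ x ≤ (i : Int) ∧ (i : Int) < x + Q ∧ y ≤ (j : Int) ∧ (j : Int) < y + Q by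
          refine ⟨by exact_mod_cast hQ0, by omega, by omega, by omega, by omega⟩)]
    rw [srcA]
    rcases sens with _ | _
    · simp only [Bool.false_eq_true, reduceIte]
      rw [show x + ((j - y.toNat : Nat) : Int) = x + ((j : Int) - y) from by omega,
          show y + ((Q : Nat) : Int) - 1 - ((i - x.toNat : Nat) : Int) = y + (Q : Int) - 1 - ((i : Int) - x) from by omega]
    · simp only [reduceIte]
      rw [show x + ((Q : Nat) : Int) - 1 - ((j - y.toNat : Nat) : Int) = x + (Q : Int) - 1 - ((j : Int) - y) from by omega,
          show y + ((i - x.toNat : Nat) : Int) = y + ((i : Int) - x) from by omega]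
  · rw [if_neg hwin, bCell,
        if_neg (fun h => hwin ⟨by omega, by omega, by omega, by omega⟩)]
    rw [gg, List.getD_eq_getElem _ _ hip, List.getD_eq_getElem _ _ hjp]
    exact (pvGet2_getElem plateau hip hjp).symm

theorem rows_of_take_drop {plateau : List (List Int)} {x0 Q yQ : Nat}
    (hlen : x0 + Q ≤ plateau.length)
    (h : ∀ row ∈ (plateau.drop x0).take Q, yQ ≤ row.length) :
    ∀ a : Nat, x0 ≤ a → a < x0 + Q → yQ ≤ (plateau.getD a []).length := by
  intro a h1 h2
  have ha : a < plateau.length := by omega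
  have hmem : plateau[a] ∈ (plateau.drop x0).take Q := by
    apply List.mem_of_getElem? (i := a - x0)
    rw [List.getElem?_take, if_pos (by omega), List.getElem?_drop,
        show x0 + (a - x0) = a from by omega, List.getElem?_eq_getElem ha]
  have := h _ hmem
  rwa [List.getD_eq_getElem _ _ ha]

-- ===== VERDICT (by name: the statement is the Claim_ definition above) =====
theorem rotation_plateau_spec : Claim_equal_rotation_plateau := by
  intro plateau m n sens _ hpre
  unfold Spec_rotation_plateau
  unfold Pre_rotation_plateau at hpre
  unfold rotation_plateau rotation_plateau_alt
  dsimp only at hpre ⊢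
  have hfd := PySem.Int.floordiv_mul_add_mod m 2
  have hm0 := PySem.Int.mod_nonneg m (b := 2) (by norm_num)
  have hm2 := PySem.Int.mod_lt m (b := 2) (by norm_num)
  by_cases hq0 : PySem.Int.floordiv m 2 ≤ 0
  · rw [show (PySem.Int.floordiv m 2).toNat = 0 from by omega]
    simp only [List.replicate_zero]
    rw [aOuter_nil, bgrid_id _ _ _ _ _ (by omega)]
    rfl
  · by_cases hn2 : PySem.Int.mod n 2 = 0 <;> by_cases hn3 : n > 2 <;>
      simp only [if_pos, hn2, hn3, if_false] at hpre ⊢ <;>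
      rcases hpre with h1 | ⟨e1, e2, hlen, hrows⟩ <;>
      first
        | omega
        | (apply main_branch plateau sens _ _ _ _ _ ((PySem.Int.floordiv m 2).toNat)
             (Int.toNat_of_nonneg (by omega)).symm (by omega) (by omega) (by omega)
             (by omega) (by omega) (by omega)
           intro a h1 h2
           have := rows_of_take_drop (by omega) hrows a (by omega) (by omega)
           omega)
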